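-- pv_equiv track=rewrite | github.com/Dinnerb0ne2/pvim | src/features/refactor.py | replace_all
-- ===== SOURCE A (Python) =====
-- def replace_all(lines: list[str], old: str, new: str) -> tuple[list[str], int]:
--     if not old:
--         return lines, 0
--     count = 0
--     updated: list[str] = []
--     for line in lines:
--         replaced, changed = line.replace(old, new), line.count(old)
--         updated.append(replaced)
--         count += changed
--     return updated, count
-- ===== SOURCE B (Python) =====
-- def replace_all(lines: list[str], old: str, new: str) -> tuple[list[str], int]:
--     if not old:
--         return lines, 0
--     parts_per_line = [line.split(old) for line in lines]
--     updated = [new.join(parts) for parts in parts_per_line]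
--     count = sum(len(parts) - 1 for parts in parts_per_line)
--     return updated, count
-- ===== Notes on version B (the rewrite author's own statement) =====
-- stated objective: alternative
-- what changed: B derives both outputs from a single split per line: the new line is new.join(line.split(old)) and the per-line occurrence count is len(parts)-1, replacing A's separate replace() and count() scans and its explicit accumulator loop with comprehensions over the split lists.
import Mathlib
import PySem

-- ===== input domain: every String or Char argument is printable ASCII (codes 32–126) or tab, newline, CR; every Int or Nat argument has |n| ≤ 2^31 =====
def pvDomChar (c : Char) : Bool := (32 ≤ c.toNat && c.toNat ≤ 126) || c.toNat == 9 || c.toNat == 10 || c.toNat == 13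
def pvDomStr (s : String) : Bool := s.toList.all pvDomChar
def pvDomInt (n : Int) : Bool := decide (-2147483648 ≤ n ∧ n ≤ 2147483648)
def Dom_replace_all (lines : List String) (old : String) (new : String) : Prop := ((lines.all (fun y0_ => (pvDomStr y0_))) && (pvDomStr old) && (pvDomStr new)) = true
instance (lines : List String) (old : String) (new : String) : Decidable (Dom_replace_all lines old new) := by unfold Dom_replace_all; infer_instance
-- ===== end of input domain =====

-- B derives both outputs from a single split per line (new.join(line.split(old)), count = len(parts)-1)
-- instead of A's separate replace() and count() scans with an accumulator loop.  Objective: alternative.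

-- ===== PORT A =====
def replace_all (lines : List String) (old : String) (new : String) : List String × Int :=
  if old = "" then (lines, 0)
  else
    -- state: (count, updated), folded over the lines exactly as A's loop
    let st := lines.foldl
      (fun (st : Int × List String) line =>
        let replaced := PySem.Str.replace line old new
        let changed := (PySem.Str.count line old : Int)
        (st.1 + changed, st.2 ++ [replaced]))
      (0, [])
    (st.2, st.1)

-- ===== PORT B =====
def replace_all_alt (lines : List String) (old : String) (new : String) : List String × Int :=
  if old = "" then (lines, 0)
  else
    let partsPerLine := lines.map (fun line => (PySem.Str.split? line old).getD [])
    let updated := partsPerLine.map (fun parts => PySem.Str.join new parts)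
    let count := (partsPerLine.map (fun parts => (parts.length : Int) - 1)).sum
    (updated, count)

-- ===== PRECONDITION & SPEC =====
def Spec_replace_all (lines : List String) (old : String) (new : String) (out : List String × Int) : Prop := out = replace_all_alt lines old new
instance (lines : List String) (old : String) (new : String) (out : List String × Int) : Decidable (Spec_replace_all lines old new out) := by unfold Spec_replace_all; infer_instance

-- ===== CLAIM (what is proved, stated in full; the proofs are below) =====
def Claim_equal_replace_all : Prop := ∀ (lines : List String) (old : String) (new : String), Dom_replace_all lines old new → Spec_replace_all lines old new (replace_all lines old new)

-- ===== LEMMAS AND PROOFS =====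

-- head and tail of line.split(old) (old ≠ []), top-down
def pvPartsP (old : List Char) : List Char → List Char × List (List Char)
  | [] => ([], [])
  | c :: t =>
    if old.isPrefixOf (c :: t) then
      let r := pvPartsP old (t.drop (old.length - 1))
      ([], r.1 :: r.2)
    else
      let r := pvPartsP old t
      (c :: r.1, r.2)
  termination_by l => l.length
  decreasing_by
    · simp
    · simp

-- line.replace(old, new) (old ≠ []), top-down
def pvRepl (old new : List Char) : List Char → List Char
  | [] => []
  | c :: t =>
    if old.isPrefixOf (c :: t) then new ++ pvRepl old new (t.drop (old.length - 1))
    else c :: pvRepl old new t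
  termination_by l => l.length
  decreasing_by
    · simp
    · simp

-- line.count(old) (old ≠ []), top-down
def pvCnt (old : List Char) : List Char → Nat
  | [] => 0
  | c :: t =>
    if old.isPrefixOf (c :: t) then pvCnt old (t.drop (old.length - 1)) + 1
    else pvCnt old t
  termination_by l => l.length
  decreasing_by
    · simp
    · simp

lemma drop_eq_of_ne_nil {α : Type} (old : List α) (h : old ≠ []) (c : α) (t : List α) :
    (c :: t).drop old.length = t.drop (old.length - 1) := by
  cases old with
  | nil => exact absurd rfl h
  | cons a as => simp

lemma replace_go_eq (old new : List Char) (h : old ≠ []) :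
    ∀ (fuel : Nat) (l acc : List Char), l.length ≤ fuel →
      PySem.Chars.replace.go old new fuel l acc = acc.reverse ++ pvRepl old new l := by
  intro fuel
  induction fuel with
  | zero =>
    intro l acc hl
    have : l = [] := List.eq_nil_of_length_eq_zero (Nat.le_zero.mp hl)
    subst this
    simp [PySem.Chars.replace.go, pvRepl]
  | succ n ih =>
    intro l acc hl
    cases l with
    | nil => simp [PySem.Chars.replace.go, pvRepl]
    | cons c t =>
      rw [PySem.Chars.replace.go]
      by_cases hp : old.isPrefixOf (c :: t)
      · rw [if_pos hp]
        rw [drop_eq_of_ne_nil old h c t]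
        have hlen : (t.drop (old.length - 1)).length ≤ n := by
          simp at hl ⊢; omega
        rw [ih _ _ hlen]
        rw [pvRepl, if_pos hp]
        simp
      · rw [if_neg hp]
        have hlen : t.length ≤ n := by simp at hl; omega
        rw [ih _ _ hlen]
        rw [pvRepl, if_neg hp]
        simp

lemma count_go_eq (old : List Char) (h : old ≠ []) :
    ∀ (fuel : Nat) (l : List Char) (acc : Nat), l.length ≤ fuel →
      PySem.Chars.count.go old fuel l acc = acc + pvCnt old l := by
  intro fuel
  induction fuel with
  | zero =>
    intro l acc hl
    have : l = [] := List.eq_nil_of_length_eq_zero (Nat.le_zero.mp hl)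
    subst this
    simp [PySem.Chars.count.go, pvCnt]
  | succ n ih =>
    intro l acc hl
    cases l with
    | nil => simp [PySem.Chars.count.go, pvCnt]
    | cons c t =>
      rw [PySem.Chars.count.go]
      by_cases hp : old.isPrefixOf (c :: t)
      · rw [if_pos hp]
        rw [drop_eq_of_ne_nil old h c t]
        have hlen : (t.drop (old.length - 1)).length ≤ n := by
          simp at hl ⊢; omega
        rw [ih _ _ hlen]
        rw [pvCnt, if_pos hp]
        omega
      · rw [if_neg hp]
        have hlen : t.length ≤ n := by simp at hl; omega
        rw [ih _ _ hlen]
        rw [pvCnt, if_neg hp]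

lemma splitOn_go_eq (old : List Char) (h : old ≠ []) :
    ∀ (fuel : Nat) (l cur : List Char) (acc : List (List Char)), l.length ≤ fuel →
      PySem.Chars.splitOn.go old fuel l cur acc =
        acc.reverse ++ (cur.reverse ++ (pvPartsP old l).1) :: (pvPartsP old l).2 := by
  intro fuel
  induction fuel with
  | zero =>
    intro l cur acc hl
    have : l = [] := List.eq_nil_of_length_eq_zero (Nat.le_zero.mp hl)
    subst this
    simp [PySem.Chars.splitOn.go, pvPartsP]
  | succ n ih =>
    intro l cur acc hl
    cases l with
    | nil => simp [PySem.Chars.splitOn.go, pvPartsP]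
    | cons c t =>
      rw [PySem.Chars.splitOn.go]
      by_cases hp : old.isPrefixOf (c :: t)
      · rw [if_pos hp]
        rw [drop_eq_of_ne_nil old h c t]
        have hlen : (t.drop (old.length - 1)).length ≤ n := by
          simp at hl ⊢; omega
        rw [ih _ _ _ hlen]
        rw [pvPartsP, if_pos hp]
        simp
      · rw [if_neg hp]
        have hlen : t.length ≤ n := by simp at hl; omega
        rw [ih _ _ _ hlen]
        rw [pvPartsP, if_neg hp]
        simp

lemma chars_replace_eq (s old new : List Char) (h : old ≠ []) :
    PySem.Chars.replace s old new = pvRepl old new s := by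
  rw [PySem.Chars.replace, if_neg (by simpa using h)]
  simpa using replace_go_eq old new h s.length s [] le_rfl

lemma chars_count_eq (s old : List Char) (h : old ≠ []) :
    PySem.Chars.count s old = pvCnt old s := by
  rw [PySem.Chars.count, if_neg (by simpa using h)]
  simpa using count_go_eq old h s.length s 0 le_rfl

lemma chars_splitOn_eq (s old : List Char) (h : old ≠ []) :
    PySem.Chars.splitOn s old = (pvPartsP old s).1 :: (pvPartsP old s).2 := by
  rw [PySem.Chars.splitOn]
  simpa using splitOn_go_eq old h (s.length + 1) s [] [] (Nat.le_succ _)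

-- join new (split s old) = replace s old new
lemma join_parts_eq (old new : List Char) :
    ∀ s : List Char,
      PySem.Chars.join new ((pvPartsP old s).1 :: (pvPartsP old s).2) = pvRepl old new s := by
  intro s
  induction s using pvPartsP.induct old with
  | case1 => simp [pvPartsP, pvRepl, PySem.Chars.join_singleton]
  | case2 c t hp ih =>
    rw [pvPartsP, if_pos hp, pvRepl, if_pos hp]
    simp only []
    rw [PySem.Chars.join_cons_cons]
    simp only [List.nil_append]
    rw [ih]
  | case3 c t hp ih =>
    rw [pvPartsP, if_neg hp, pvRepl, if_neg hp]
    simp only []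
    cases h2 : (pvPartsP old t).2 with
    | nil =>
      rw [h2] at ih
      rw [PySem.Chars.join_singleton] at ih ⊢
      simp [ih]
    | cons q qs =>
      rw [h2] at ih
      rw [PySem.Chars.join_cons_cons] at ih ⊢
      simp [← ih]

-- number of parts - 1 = count
lemma parts_len_eq (old : List Char) :
    ∀ s : List Char, (pvPartsP old s).2.length = pvCnt old s := by
  intro s
  induction s using pvPartsP.induct old with
  | case1 => simp [pvPartsP, pvCnt]
  | case2 c t hp ih =>
    rw [pvPartsP, if_pos hp, pvCnt, if_pos hp]
    simpa using ih
  | case3 c t hp ih =>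
    rw [pvPartsP, if_neg hp, pvCnt, if_neg hp]
    simpa using ih

-- per-line equalities on String level
lemma str_parts (line old : String) (h : old ≠ "") :
    (PySem.Str.split? line old).getD [] =
      ((pvPartsP old.toList line.toList).1 :: (pvPartsP old.toList line.toList).2).map String.ofList := by
  have hne : old.toList ≠ [] := by
    intro hl; apply h; apply String.toList_injective; simpa using hl
  rw [PySem.Str.split?, PySem.Chars.split?]
  rw [if_neg (by simpa using hne)]
  simp [chars_splitOn_eq _ _ hne]

lemma str_join_line (line old new : String) (h : old ≠ "") :
    PySem.Str.join new ((PySem.Str.split? line old).getD []) = PySem.Str.replace line old new := by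
  have hne : old.toList ≠ [] := by
    intro hl; apply h; apply String.toList_injective; simpa using hl
  rw [str_parts line old h, PySem.Str.join, PySem.Str.replace, chars_replace_eq _ _ _ hne]
  rw [← join_parts_eq old.toList new.toList line.toList]
  congr 1
  simp [List.map_map, Function.comp_def]

lemma str_count_line (line old : String) (h : old ≠ "") :
    (((PySem.Str.split? line old).getD []).length : Int) - 1 = (PySem.Str.count line old : Int) := by
  have hne : old.toList ≠ [] := by
    intro hl; apply h; apply String.toList_injective; simpa using hl
  rw [str_parts line old h, PySem.Str.count, chars_count_eq _ _ hne,
      ← parts_len_eq old.toList line.toList]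
  simp

-- A's fold computes the pair of maps
lemma foldA (old new : String) :
    ∀ (lines : List String) (c : Int) (u : List String),
      lines.foldl
        (fun (st : Int × List String) line =>
          (st.1 + (PySem.Str.count line old : Int), st.2 ++ [PySem.Str.replace line old new]))
        (c, u) =
      (c + (lines.map (fun l => (PySem.Str.count l old : Int))).sum,
       u ++ lines.map (fun l => PySem.Str.replace l old new)) := by
  intro lines
  induction lines with
  | nil => simp
  | cons x xs ih =>
    intro c u
    simp only [List.foldl_cons, List.map_cons, List.sum_cons]
    rw [ih]
    rw [Prod.mk.injEq]
    refine ⟨by ring, by simp⟩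

-- ===== VERDICT (by name: the statement is the Claim_ definition above) =====
theorem replace_all_spec : Claim_equal_replace_all := by
  intro lines old new _
  unfold Spec_replace_all replace_all replace_all_alt
  by_cases h : old = ""
  · simp [h]
  · rw [if_neg h, if_neg h]
    simp only []
    rw [foldA]
    rw [Prod.mk.injEq]
    constructor
    · simp only [List.map_map, Function.comp_def, List.nil_append]
      exact List.map_congr_left (fun l _ => (str_join_line l old new h).symm)
    · simp only [List.map_map, Function.comp_def, zero_add]
      congr 1
      exact List.map_congr_left (fun l _ => (str_count_line l old h).symm)
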